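-- pv_equiv track=rewrite | github.com/SyperOlao/generator-screenshots | copy_pptx/copy_pptx_xml.py | generate_ids
-- ===== SOURCE A (Python) =====
-- def generate_ids(n):
--     number = 3900
--     counter = 0
--     step = 3
--     numbers = []
--     for _ in range(n):
--         numbers.append(number)
--         counter += 1
--         if counter == 6:
--             step = 1
--             counter = 0
--         number += step
--     return numbers
-- ===== SOURCE B (Python) =====
-- def generate_ids(n):
--     return [3900 + 3 * i if i < 6 else 3910 + i for i in range(n)]
-- ===== Notes on version B (the rewrite author's own statement) =====
-- stated objective: simpler
-- what changed: Replaces the stateful number/counter/step loop with a single list comprehension using a per-index closed form (3900+3*i for i<6, else 3910+i).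
import Mathlib
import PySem

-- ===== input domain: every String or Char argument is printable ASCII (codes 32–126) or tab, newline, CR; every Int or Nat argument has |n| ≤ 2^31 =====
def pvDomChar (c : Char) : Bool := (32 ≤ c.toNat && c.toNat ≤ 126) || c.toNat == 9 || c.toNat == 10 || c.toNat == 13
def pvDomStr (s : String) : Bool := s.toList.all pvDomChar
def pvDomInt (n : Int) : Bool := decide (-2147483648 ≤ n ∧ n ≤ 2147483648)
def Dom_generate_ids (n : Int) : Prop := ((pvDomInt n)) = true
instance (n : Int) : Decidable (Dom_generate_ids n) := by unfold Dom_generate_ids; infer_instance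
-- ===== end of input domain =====

-- ===== PORT A =====
-- B replaces A's stateful number/counter/step loop with a per-index closed form (objective: simpler).
def generate_ids_body (st : Int × Int × Int × List Int) (_ : Int) : Int × Int × Int × List Int :=
  let (number, counter, step, numbers) := st
  let numbers := numbers ++ [number]
  let counter := counter + 1
  let (step, counter) := if counter == 6 then ((1 : Int), (0 : Int)) else (step, counter)
  (number + step, counter, step, numbers)

def generate_ids (n : Int) : List Int :=
  ((PySem.List.pyRange 0 n 1).foldl generate_ids_body (3900, 0, 3, [])).2.2.2

-- ===== PORT B =====
def generate_ids_alt (n : Int) : List Int :=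
  (List.range n.toNat).map (fun i : Nat => if i < 6 then 3900 + 3 * (i : Int) else 3910 + (i : Int))

-- ===== PRECONDITION & SPEC =====
def Spec_generate_ids (n : Int) (out : List Int) : Prop := out = generate_ids_alt n
instance (n : Int) (out : List Int) : Decidable (Spec_generate_ids n out) := by unfold Spec_generate_ids; infer_instance

-- ===== CLAIM (what is proved, stated in full; the proofs are below) =====
def Claim_equal_generate_ids : Prop := ∀ (n : Int), Dom_generate_ids n → Spec_generate_ids n (generate_ids n)

-- ===== LEMMAS AND PROOFS =====

-- one loop iteration, as a function of the state alone (the body ignores the range element)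
def gi_step (s : Int × Int × Int × List Int) : Int × Int × Int × List Int :=
  generate_ids_body s 0

-- the loop body ignores the range element, so the fold only depends on the list's length
theorem foldl_body_length (xs : List Int) (st : Int × Int × Int × List Int) :
    xs.foldl generate_ids_body st = gi_step^[xs.length] st := by
  induction xs generalizing st with
  | nil => rfl
  | cons x xs ih =>
    rw [List.foldl_cons, ih, List.length_cons, Function.iterate_succ_apply]
    rfl

-- once step = 1, every iteration appends the current number and increments it by 1
theorem iterate_step_one (m : Nat) (num c : Int) (acc : List Int) :
    gi_step^[m] (num, c % 6, 1, acc)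
      = (num + m, (c + m) % 6, 1, acc ++ List.map (fun i : Nat => num + (i : Int)) (List.range m)) := by
  induction m generalizing num c acc with
  | zero => simp
  | succ m ih =>
    rw [Function.iterate_succ_apply]
    have hb : gi_step (num, c % 6, 1, acc) = (num + 1, (c + 1) % 6, 1, acc ++ [num]) := by
      simp only [gi_step, generate_ids_body]
      by_cases h : c % 6 + 1 = 6
      · have h0 : (c + 1) % 6 = 0 := by omega
        simp [h, h0]
      · have h1 : (c + 1) % 6 = c % 6 + 1 := by omega
        simp [h, h1]
    have h2 : (c + 1) % 6 = ((c + 1) % 6) % 6 := by omega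
    have hr : List.map (fun i : Nat => num + (i : Int)) (List.range (m + 1))
        = num :: List.map (fun i : Nat => num + 1 + (i : Int)) (List.range m) := by
      rw [List.range_succ_eq_map, List.map_cons, List.map_map]
      simp only [Nat.cast_zero, add_zero]
      congr 1
      exact List.map_congr_left (fun i _ => by simp [Function.comp]; ring)
    rw [hb, h2, ih, hr]
    have e1 : num + 1 + (m : Int) = num + ((m + 1 : Nat) : Int) := by push_cast; ring
    have e2 : ((c + 1) % 6 + (m : Int)) % 6 = (c + ((m + 1 : Nat) : Int)) % 6 := by push_cast; omega
    rw [e1, e2, List.append_assoc, List.singleton_append]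

-- ===== VERDICT (by name: the statement is the Claim_ definition above) =====
theorem generate_ids_spec : Claim_equal_generate_ids := by
  intro n _
  show generate_ids n = generate_ids_alt n
  unfold generate_ids generate_ids_alt
  rw [foldl_body_length, PySem.List.length_pyRange_one]
  have hn : (n - 0).toNat = n.toNat := by omega
  rw [hn]
  by_cases h6 : n.toNat ≤ 6
  · interval_cases h : n.toNat <;> decide
  · conv_lhs => rw [show n.toNat = (n.toNat - 6) + 6 from by omega, Function.iterate_add_apply]
    conv_rhs => rw [show n.toNat = 6 + (n.toNat - 6) from by omega, List.range_add]
    have h6it : gi_step^[6] ((3900, 0, 3, []) : Int × Int × Int × List Int)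
        = (3916, (0 : Int) % 6, 1, [3900, 3903, 3906, 3909, 3912, 3915]) := by decide
    rw [h6it, iterate_step_one (n.toNat - 6) 3916 0 [3900, 3903, 3906, 3909, 3912, 3915]]
    have hsplit2 : List.map (fun i : Nat => if i < 6 then 3900 + 3 * (i : Int) else 3910 + (i : Int))
          (List.range 6 ++ List.map (fun x => 6 + x) (List.range (n.toNat - 6)))
        = [3900, 3903, 3906, 3909, 3912, 3915]
          ++ List.map (fun i : Nat => (3916 : Int) + (i : Int)) (List.range (n.toNat - 6)) := by
      rw [List.map_append, List.map_map]
      congr 1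
      exact List.map_congr_left (fun i _ => by
        have hlt : ¬ (6 + i < 6) := by omega
        simp [Function.comp, hlt]; ring)
    rw [hsplit2]
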